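-- pv_equiv track=rewrite | github.com/winne-w/jx3bot | src/plugins/wanbaolou/searcher.py | calculate_consecutive_bonus
-- ===== SOURCE A (Python) =====
-- def calculate_consecutive_bonus(keyword: str, text: str) -> int:
--     """
--     计算连续匹配字符的额外分数
--     """
--     bonus = 0
--     current_pos = 0
--     consecutive_count = 0
--
--     for char in keyword:
--         # 从上一个找到的位置之后开始查找
--         pos = text.find(char, current_pos)
--         if pos == -1:
--             break
--
--         # 如果字符位置连续，增加连续计数
--         if pos == current_pos:
--             consecutive_count += 1
--         else:
--             # 重置连续计数
--             consecutive_count = 1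
--
--         current_pos = pos + 1
--
--     # 连续字符越多，奖励越高
--     bonus = consecutive_count * 20
--     return bonus
-- ===== SOURCE B (Python) =====
-- def calculate_consecutive_bonus(keyword: str, text: str) -> int:
--     """
--     Two-phase: first collect the greedily matched positions,
--     then measure the trailing consecutive run from the back.
--     """
--     positions = []
--     cur = 0
--     for ch in keyword:
--         p = text.find(ch, cur)
--         if p == -1:
--             break
--         positions.append(p)
--         cur = p + 1
--     if not positions:
--         return 0
--     run = 1
--     rev = positions[::-1]
--     for a, b in zip(rev, rev[1:]):
--         if a != b + 1:
--             break
--         run += 1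
--     return run * 20
-- ===== Notes on version B (the rewrite author's own statement) =====
-- stated objective: alternative
-- what changed: A's single stateful loop (find + reset/increment counter intertwined) is split into two phases: collect the greedily matched positions into a list, then measure the trailing run of consecutive positions by a backward scan over the reversed list.
import Mathlib
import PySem

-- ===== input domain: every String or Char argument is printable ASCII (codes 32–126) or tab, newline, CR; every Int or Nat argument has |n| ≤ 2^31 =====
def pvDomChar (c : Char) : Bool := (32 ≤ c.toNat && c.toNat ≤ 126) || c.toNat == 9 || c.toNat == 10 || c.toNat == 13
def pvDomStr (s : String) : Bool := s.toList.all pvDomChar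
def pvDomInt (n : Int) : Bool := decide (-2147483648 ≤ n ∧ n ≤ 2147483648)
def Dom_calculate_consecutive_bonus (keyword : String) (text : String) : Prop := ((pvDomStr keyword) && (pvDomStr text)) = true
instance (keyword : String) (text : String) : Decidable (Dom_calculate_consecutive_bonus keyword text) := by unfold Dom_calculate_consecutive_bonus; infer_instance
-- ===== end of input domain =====

-- B replaces A's single intertwined find/counter loop with two phases (collect matched
-- positions, then measure the trailing consecutive run backwards); same cost, alternative shape.

-- ===== PORT A =====
-- the for-loop of A with its break, state = (current_pos, consecutive_count)
def pvLoopA (text : String) : List Char → Int → Int → Int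
  | [], _, cc => cc
  | c :: rest, cur, cc =>
    let pos := PySem.Str.findFrom text (String.ofList [c]) cur none
    if pos = -1 then cc
    else pvLoopA text rest (pos + 1) (if pos = cur then cc + 1 else 1)

def calculate_consecutive_bonus (keyword : String) (text : String) : Int :=
  pvLoopA text keyword.toList 0 0 * 20

-- ===== PORT B =====
-- phase 1 of B: collect greedily matched positions, stopping at the first miss
def pvCollect (text : String) : List Char → Int → List Int
  | [], _ => []
  | c :: rest, cur =>
    let p := PySem.Str.findFrom text (String.ofList [c]) cur none
    if p = -1 then [] else p :: pvCollect text rest (p + 1)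

-- phase 2 of B: the zip-loop over the reversed positions (run = 1 + leading good pairs)
def pvTrail : List Int → Int
  | x :: y :: rest => if x = y + 1 then 1 + pvTrail (y :: rest) else 1
  | _ => 1

def calculate_consecutive_bonus_alt (keyword : String) (text : String) : Int :=
  let ps := pvCollect text keyword.toList 0
  if ps = [] then 0 else pvTrail ps.reverse * 20

-- ===== PRECONDITION & SPEC =====
def Spec_calculate_consecutive_bonus (keyword : String) (text : String) (out : Int) : Prop := out = calculate_consecutive_bonus_alt keyword text
instance (keyword : String) (text : String) (out : Int) : Decidable (Spec_calculate_consecutive_bonus keyword text out) := by unfold Spec_calculate_consecutive_bonus; infer_instance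

-- ===== CLAIM (what is proved, stated in full; the proofs are below) =====
def Claim_equal_calculate_consecutive_bonus : Prop := ∀ (keyword : String) (text : String), Dom_calculate_consecutive_bonus keyword text → Spec_calculate_consecutive_bonus keyword text (calculate_consecutive_bonus keyword text)

-- ===== LEMMAS AND PROOFS =====

-- proof helper: A's loop replayed over an already-collected position list
def pvF : List Int → Int → Int → Int
  | [], _, cc => cc
  | p :: ps, cur, cc => pvF ps (p + 1) (if p = cur then cc + 1 else 1)

theorem pvLoopA_eq_pvF (text : String) (cs : List Char) :
    ∀ cur cc, pvLoopA text cs cur cc = pvF (pvCollect text cs cur) cur cc := by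
  induction cs with
  | nil => intro cur cc; rfl
  | cons c rest ih =>
    intro cur cc
    simp only [pvLoopA, pvCollect]
    split
    · rfl
    · simp only [pvF]; exact ih _ _

theorem pvF_snoc (q : Int) (ps : List Int) :
    ∀ cur cc, pvF (ps ++ [q]) cur cc =
      if q = ps.getLastD (cur - 1) + 1 then pvF ps cur cc + 1 else 1 := by
  induction ps with
  | nil =>
    intro cur cc
    simp only [List.nil_append, pvF, List.getLastD_nil]
    have h : cur - 1 + 1 = cur := by ring
    rw [h]
  | cons p ps ih =>
    intro cur cc
    simp only [List.cons_append, pvF, List.getLastD_cons]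
    rw [ih]
    have h : p + 1 - 1 = p := by ring
    rw [h]

theorem pvF_eq_pvTrail (ps : List Int) (h : ps ≠ []) :
    pvF ps 0 0 = pvTrail ps.reverse := by
  induction ps using List.reverseRecOn with
  | nil => exact absurd rfl h
  | append_singleton ps q ih =>
    rw [pvF_snoc, List.reverse_append]
    cases ps with
    | nil =>
      simp only [List.getLastD_nil, List.reverse_nil]
      split <;> rfl
    | cons p ps' =>
      have hrev : (p :: ps').reverse ≠ [] := by simp
      obtain ⟨x, t, hx⟩ := List.exists_cons_of_ne_nil hrev
      have hlast : (p :: ps').getLastD (0 - 1) = x := by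
        have this : (List.reverse (p :: ps')).head? = (p :: ps').getLast? := List.head?_reverse
        rw [hx] at this
        simp only [List.head?_cons] at this
        rw [List.getLastD_eq_getLast?, ← this]
        rfl
      rw [hlast, ih (by simp), hx]
      simp only [List.reverse_singleton, List.singleton_append, pvTrail]
      split <;> ring

-- ===== VERDICT (by name: the statement is the Claim_ definition above) =====
theorem calculate_consecutive_bonus_spec : Claim_equal_calculate_consecutive_bonus := by
  unfold Claim_equal_calculate_consecutive_bonus
  intro keyword text _
  unfold Spec_calculate_consecutive_bonus calculate_consecutive_bonus calculate_consecutive_bonus_alt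
  rw [pvLoopA_eq_pvF]
  cases h : pvCollect text keyword.toList 0 with
  | nil => simp [pvF]
  | cons p ps =>
    simp only [reduceCtorEq, if_false]
    rw [pvF_eq_pvTrail _ (by simp)]
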